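-- pv_equiv track=rewrite | github.com/spratik27112005-wq/VITYARTHI | PROGRAMS/2/is_chronic.py | is_chronic
-- ===== SOURCE A (Python) =====
-- def is_chronic(n):
--     a=1
--     total=0
--     for i in range(n):
--         num=a*i
--         if num==n:
--             total=1
--         a+=1
--         i+=1
--     return total
-- ===== SOURCE B (Python) =====
-- def is_chronic(n):
--     # Binary search for the least i >= 0 with i*(i+1) >= n, then test equality.
--     if n <= 0:
--         return 0
--     lo, hi = 0, n
--     while lo < hi:
--         mid = (lo + hi) // 2
--         if mid * (mid + 1) < n:
--             lo = mid + 1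
--         else:
--             hi = mid
--     return 1 if lo * (lo + 1) == n else 0
-- ===== Notes on version B (the rewrite author's own statement) =====
-- stated objective: faster
-- what changed: Replaced A's linear scan of all i in range(n) testing i*(i+1)==n by a binary search for the least i with i*(i+1)>=n followed by a single equality test.
import Mathlib
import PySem

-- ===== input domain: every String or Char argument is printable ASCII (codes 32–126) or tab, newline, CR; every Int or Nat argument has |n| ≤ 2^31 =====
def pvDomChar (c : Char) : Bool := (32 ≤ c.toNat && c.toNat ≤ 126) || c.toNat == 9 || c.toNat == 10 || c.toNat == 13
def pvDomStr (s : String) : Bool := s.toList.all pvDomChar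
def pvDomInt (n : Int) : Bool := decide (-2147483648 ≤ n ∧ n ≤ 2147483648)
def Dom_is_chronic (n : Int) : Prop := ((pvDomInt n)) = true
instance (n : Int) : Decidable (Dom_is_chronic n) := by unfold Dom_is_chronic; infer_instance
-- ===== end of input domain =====

-- B replaces A's linear scan over range(n) by an O(log n) binary search for the
-- least i with i*(i+1) >= n; same return value on every Int input.


-- ===== PORT A =====
-- for i in range(n): num=a*i; if num==n: total=1; a+=1  (the i+=1 is dead: range reassigns i)
def is_chronic (n : Int) : Int :=
  ((PySem.List.pyRange 0 n 1).foldl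
    (fun (s : Int × Int) (i : Int) =>
      let num := s.1 * i
      let total := if num == n then 1 else s.2
      (s.1 + 1, total))
    ((1 : Int), (0 : Int))).2

-- ===== PORT B =====
-- while lo < hi: mid = (lo+hi)//2; if mid*(mid+1) < n: lo = mid+1 else: hi = mid
def bsearchChronic (n lo hi : Int) : Int :=
  if h : lo < hi then
    let mid := PySem.Int.floordiv (lo + hi) 2
    if mid * (mid + 1) < n then bsearchChronic n (mid + 1) hi
    else bsearchChronic n lo mid
  else lo
termination_by (hi - lo).toNat
decreasing_by
  all_goals
    simp only [PySem.Int.floordiv_eq_ediv_of_pos (by norm_num : (0:Int) < 2)]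
    omega

def is_chronic_alt (n : Int) : Int :=
  if n ≤ 0 then 0
  else
    let lo := bsearchChronic n 0 n
    if lo * (lo + 1) == n then 1 else 0

-- ===== PRECONDITION & SPEC =====
def Spec_is_chronic (n : Int) (out : Int) : Prop := out = is_chronic_alt n
instance (n : Int) (out : Int) : Decidable (Spec_is_chronic n out) := by unfold Spec_is_chronic; infer_instance

-- ===== CLAIM (what is proved, stated in full; the proofs are below) =====
def Claim_equal_is_chronic : Prop := ∀ (n : Int), Dom_is_chronic n → Spec_is_chronic n (is_chronic n)

-- ===== LEMMAS AND PROOFS =====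

-- i ↦ i*(i+1) is strictly monotone on the nonnegative integers
theorem chronic_mono {i j : Int} (hi : 0 ≤ i) (hij : i < j) :
    i * (i + 1) < j * (j + 1) := by nlinarith

-- the A-side fold: first component counts up ...
theorem foldA_fst (n : Int) (m : Nat) (a0 t0 : Int) :
    (((List.range m).map (fun k : Nat => (k : Int))).foldl
      (fun (s : Int × Int) (i : Int) =>
        (s.1 + 1, if s.1 * i == n then 1 else s.2)) (a0, t0)).1 = a0 + m := by
  induction m generalizing a0 t0 with
  | zero => simp
  | succ m ih =>
      rw [List.range_succ, List.map_append, List.foldl_append]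
      simp only [List.map_cons, List.map_nil, List.foldl_cons, List.foldl_nil]
      have hh := ih a0 t0
      rcases hs : (((List.range m).map (fun k : Nat => (k : Int))).foldl
        (fun (s : Int × Int) (i : Int) =>
          (s.1 + 1, if s.1 * i == n then 1 else s.2)) (a0, t0)) with ⟨a, t⟩
      rw [hs] at hh
      simp only at hh
      simp [hh]
      ring

-- ... and the second records whether some (a0+k)*k hit n
theorem foldA_snd (n : Int) (m : Nat) (a0 t0 : Int) :
    (((List.range m).map (fun k : Nat => (k : Int))).foldl
      (fun (s : Int × Int) (i : Int) =>
        (s.1 + 1, if s.1 * i == n then 1 else s.2)) (a0, t0)).2 =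
    if ∃ k, k < m ∧ (a0 + (k : Int)) * (k : Int) = n then 1 else t0 := by
  induction m generalizing a0 t0 with
  | zero => simp
  | succ m ih =>
      rw [List.range_succ, List.map_append, List.foldl_append]
      simp only [List.map_cons, List.map_nil, List.foldl_cons, List.foldl_nil]
      have hfst := foldA_fst n m a0 t0
      have hsnd := ih a0 t0
      rcases hs : (((List.range m).map (fun k : Nat => (k : Int))).foldl
        (fun (s : Int × Int) (i : Int) =>
          (s.1 + 1, if s.1 * i == n then 1 else s.2)) (a0, t0)) with ⟨a, t⟩
      rw [hs] at hfst hsnd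
      simp only at hfst hsnd
      subst hfst
      simp only [beq_iff_eq]
      by_cases hm : (a0 + (m : Int)) * (m : Int) = n
      · have hex : ∃ k, k < m + 1 ∧ (a0 + (k : Int)) * (k : Int) = n := ⟨m, by omega, hm⟩
        rw [if_pos hm, if_pos hex]
      · have hiff : (∃ k, k < m + 1 ∧ (a0 + (k : Int)) * (k : Int) = n) ↔
               (∃ k, k < m ∧ (a0 + (k : Int)) * (k : Int) = n) := by
          constructor
          · rintro ⟨k, hk, hkeq⟩
            refine ⟨k, ?_, hkeq⟩
            rcases Nat.lt_succ_iff_lt_or_eq.mp hk with h | h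
            · exact h
            · subst h; exact absurd hkeq hm
          · rintro ⟨k, hk, hkeq⟩; exact ⟨k, by omega, hkeq⟩
        rw [if_neg hm, hsnd]
        exact (if_congr hiff rfl rfl).symm

-- A returns 1 exactly when some k < max(n,0) satisfies (1+k)*k = n, else 0
theorem is_chronic_char (n : Int) :
    is_chronic n =
      if ∃ k, k < n.toNat ∧ (1 + (k : Int)) * (k : Int) = n then 1 else 0 := by
  unfold is_chronic
  rw [PySem.List.pyRange_one]
  have hm : (List.range (n - 0).toNat).map (fun k : Nat => (0 : Int) + (k : Int)) =
         (List.range n.toNat).map (fun k : Nat => (k : Int)) := by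
    simp
  rw [hm]
  exact foldA_snd n n.toNat 1 0

-- the binary search returns the least r ≥ lo with n ≤ r*(r+1), given the invariant
theorem bsearch_min (n : Int) : ∀ (lo hi : Int), 0 ≤ lo → lo ≤ hi →
    (∀ i : Int, 0 ≤ i → i < lo → i * (i + 1) < n) → n ≤ hi * (hi + 1) →
    (0 ≤ bsearchChronic n lo hi ∧
     (∀ i : Int, 0 ≤ i → i < bsearchChronic n lo hi → i * (i + 1) < n) ∧
     n ≤ bsearchChronic n lo hi * (bsearchChronic n lo hi + 1)) := by
  intro lo hi
  induction lo, hi using bsearchChronic.induct n with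
  | case1 lo hi h mid hlt ih =>
      intro hlo hle hbelow habove
      have hmideq : mid = (lo + hi) / 2 := by
        show PySem.Int.floordiv (lo + hi) 2 = _
        exact PySem.Int.floordiv_eq_ediv_of_pos (by norm_num)
      have hmlo : lo ≤ mid := by omega
      have hmhi : mid < hi := by omega
      rw [bsearchChronic]
      simp only [dif_pos h]
      rw [if_pos hlt]
      apply ih (by omega) (by omega) _ habove
      intro i hi0 hilt
      by_cases hcase : i < lo
      · exact hbelow i hi0 hcase
      · calc i * (i + 1) ≤ mid * (mid + 1) := by
              rcases lt_or_eq_of_le (show i ≤ mid by omega) with h' | h'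
              · exact le_of_lt (chronic_mono hi0 h')
              · rw [h']
          _ < n := hlt
  | case2 lo hi h mid hge ih =>
      intro hlo hle hbelow habove
      have hmideq : mid = (lo + hi) / 2 := by
        show PySem.Int.floordiv (lo + hi) 2 = _
        exact PySem.Int.floordiv_eq_ediv_of_pos (by norm_num)
      rw [bsearchChronic]
      simp only [dif_pos h]
      rw [if_neg hge]
      exact ih hlo (by omega) hbelow (not_lt.mp hge)
  | case3 lo hi h =>
      intro hlo hle hbelow habove
      rw [bsearchChronic]
      simp only [dif_neg h]
      refine ⟨hlo, hbelow, ?_⟩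
      have hcal : lo = hi := by omega
      rw [hcal]; exact habove

-- ===== VERDICT (by name: the statement is the Claim_ definition above) =====
theorem is_chronic_spec : Claim_equal_is_chronic := by
  intro n _
  unfold Spec_is_chronic
  by_cases hn : n ≤ 0
  · have h1 : is_chronic n = 0 := by
      rw [is_chronic_char, if_neg]
      rintro ⟨k, hk, -⟩; omega
    have h2 : is_chronic_alt n = 0 := by
      unfold is_chronic_alt; rw [if_pos hn]
    rw [h1, h2]
  · replace hn : 0 < n := lt_of_not_ge hn
    obtain ⟨hr0, hrbelow, hrabove⟩ :=
      bsearch_min n 0 n le_rfl (by omega)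
        (by intro i hi0 hilt; omega)
        (by nlinarith)
    set r := bsearchChronic n 0 n with hrdef
    have halt : is_chronic_alt n = if r * (r + 1) = n then 1 else 0 := by
      unfold is_chronic_alt
      rw [if_neg (by omega)]
      simp only [beq_iff_eq]
      rw [← hrdef]
    have key : (∃ k, k < n.toNat ∧ (1 + (k : Int)) * (k : Int) = n) ↔ r * (r + 1) = n := by
      constructor
      · rintro ⟨k, hk, hkeq⟩
        have hkeq' : (k : Int) * ((k : Int) + 1) = n := by linarith
        by_cases hkr : (k : Int) < r
        · have := hrbelow k (by positivity) hkr
          omega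
        · rcases lt_or_eq_of_le (not_lt.mp hkr) with h' | h'
          · have := chronic_mono hr0 h'
            omega
          · rw [h']; exact hkeq'
      · intro hreq
        refine ⟨r.toNat, ?_, ?_⟩
        · have hr1 : 1 ≤ r := by
            by_contra hc
            have hz : r = 0 := by omega
            rw [hz] at hreq; omega
          have : r < n := by nlinarith
          omega
        · have hc : ((r.toNat : Int)) = r := by omega
          rw [hc]; linarith
    rw [is_chronic_char, halt]
    by_cases hex : ∃ k, k < n.toNat ∧ (1 + (k : Int)) * (k : Int) = n
    · rw [if_pos hex, if_pos (key.mp hex)]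
    · rw [if_neg hex, if_neg (fun hc => hex (key.mpr hc))]
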